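-- pv_equiv track=rewrite | github.com/wikty/MachineLearningExamples | pytorch_tutorial/part_of_speech_tagging.py | build_idx
-- ===== SOURCE A (Python) =====
-- def build_idx(samples):
--     word_idx, tag_idx = {}, {}
--     for words, tags in samples:
--         for word in words:
--             if word not in word_idx:
--                 word_idx[word] = len(word_idx)
--         for tag in tags:
--             if tag not in tag_idx:
--                 tag_idx[tag] = len(tag_idx)
--     return word_idx, tag_idx
-- ===== SOURCE B (Python) =====
-- def build_idx(samples):
--     def make_idx(seqs):
--         flat = [x for seq in seqs for x in seq]
--         firsts = {x: i for i, x in reversed(list(enumerate(flat)))}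
--         return {x: n for n, x in enumerate(sorted(firsts, key=firsts.get))}
--     return make_idx([p[0] for p in samples]), make_idx([p[1] for p in samples])
-- ===== Notes on version B (the rewrite author's own statement) =====
-- stated objective: alternative
-- what changed: Replaces A's fused streaming pass (membership test + assign next index into growing dicts) with a sort-based algorithm: flatten, record each item's first-occurrence position via a reversed-enumerate overwrite dict, sort the distinct items by that position and enumerate; correct because first-occurrence positions are distinct and sorting by them reproduces exactly A's first-appearance insertion order.
import Mathlib
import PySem

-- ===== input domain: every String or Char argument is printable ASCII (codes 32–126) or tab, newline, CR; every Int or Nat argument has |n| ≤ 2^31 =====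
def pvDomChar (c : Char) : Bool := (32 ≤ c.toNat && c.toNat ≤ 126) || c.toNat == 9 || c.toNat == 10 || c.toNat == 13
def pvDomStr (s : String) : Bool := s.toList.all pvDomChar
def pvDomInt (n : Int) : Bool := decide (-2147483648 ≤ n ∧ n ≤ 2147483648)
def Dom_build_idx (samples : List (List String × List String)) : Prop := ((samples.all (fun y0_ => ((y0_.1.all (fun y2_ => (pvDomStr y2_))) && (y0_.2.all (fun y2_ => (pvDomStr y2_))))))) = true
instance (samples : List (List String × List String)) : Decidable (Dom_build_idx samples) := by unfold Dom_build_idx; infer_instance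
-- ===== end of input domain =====

-- B replaces A's fused streaming pass with a sort-based algorithm: compute each item's
-- first-occurrence position by a reversed-enumerate overwrite, sort the distinct items by that
-- position, then enumerate (objective: alternative).

-- ===== PORT A =====
-- Port of A: one fused pass; dicts grow via insert-if-absent, value = current size.
def build_idx (samples : List (List String × List String)) : (List (String × Int)) × (List (String × Int)) :=
  let st := samples.foldl
    (fun (st : PySem.Dict String Int × PySem.Dict String Int) pair =>
      let wd := pair.1.foldl
        (fun d word => if d.contains word then d else d.insert word (d.size : Int)) st.1
      let td := pair.2.foldl
        (fun d tag => if d.contains tag then d else d.insert tag (d.size : Int)) st.2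
      (wd, td))
    (PySem.Dict.empty, PySem.Dict.empty)
  (st.1.items, st.2.items)

-- ===== PORT B =====
-- firsts = {x: i for i, x in reversed(list(enumerate(flat)))} — later (earlier-position) writes win
def pvFirsts (flat : List String) : PySem.Dict String Int :=
  ((PySem.List.enumerate flat 0).reverse).foldl (fun d p => d.insert p.2 p.1) PySem.Dict.empty

-- {x: n for n, x in enumerate(sorted(firsts, key=firsts.get))}
def pvMakeIdx (seqs : List (List String)) : List (String × Int) :=
  let flat := seqs.flatMap (fun seq => seq)
  let firsts := pvFirsts flat
  let ordered := PySem.List.sorted firsts.keys (fun x => (firsts.get? x).getD 0) false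
  (PySem.List.enumerate ordered 0).map (fun p => (p.2, p.1))

def build_idx_alt (samples : List (List String × List String)) : (List (String × Int)) × (List (String × Int)) :=
  (pvMakeIdx (samples.map (fun p => p.1)), pvMakeIdx (samples.map (fun p => p.2)))

-- ===== PRECONDITION & SPEC =====
def Spec_build_idx (samples : List (List String × List String)) (out : (List (String × Int)) × (List (String × Int))) : Prop := out = build_idx_alt samples
instance (samples : List (List String × List String)) (out : (List (String × Int)) × (List (String × Int))) : Decidable (Spec_build_idx samples out) := by unfold Spec_build_idx; infer_instance

-- ===== CLAIM (what is proved, stated in full; the proofs are below) =====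
def Claim_equal_build_idx : Prop := ∀ (samples : List (List String × List String)), Dom_build_idx samples → Spec_build_idx samples (build_idx samples)

-- ===== LEMMAS AND PROOFS =====

-- the dict A has built after seeing exactly the distinct strings s (in order): key k at index of its first appearance
def toDict (s : List String) : PySem.Dict String Int :=
  PySem.Dict.mk ((PySem.List.enumerate s 0).map (fun p => (p.2, p.1)))

lemma toDict_keys (s : List String) : (toDict s).keys = s := by
  simp [toDict, PySem.Dict.keys, List.map_map, Function.comp_def,
    PySem.List.map_snd_enumerate]

lemma toDict_contains (s : List String) (w : String) :
    (toDict s).contains w = s.contains w := by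
  rw [PySem.Dict.contains_eq_decide_mem_keys, toDict_keys]
  simp

lemma toDict_step (s : List String) (w : String) :
    (if (toDict s).contains w then toDict s
     else (toDict s).insert w ((toDict s).size : Int)) = toDict (PySem.Set.add s w) := by
  by_cases h : w ∈ s
  · rw [toDict_contains, PySem.Set.add_of_mem h]
    have hc : s.contains w = true := by simpa using h
    rw [hc, if_pos rfl]
  · rw [toDict_contains, PySem.Set.add_of_not_mem h]
    have hc : s.contains w = false := by simpa using h
    rw [hc, if_neg (by simp)]
    apply PySem.Dict.ext
    rw [PySem.Dict.items_insert, toDict_contains, hc]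
    simp [toDict, PySem.Dict.size, PySem.List.enumerate_append,
      PySem.List.enumerate_cons, PySem.List.enumerate_nil, PySem.List.length_enumerate]

lemma foldl_toDict (l s : List String) :
    l.foldl (fun d w => if d.contains w then d else d.insert w (d.size : Int)) (toDict s)
      = toDict (PySem.Set.update s l) := by
  induction l generalizing s with
  | nil => simp [PySem.Set.update]
  | cons x xs ih =>
    rw [List.foldl_cons, toDict_step, PySem.Set.update_cons, ih]

lemma outer_foldl (samples : List (List String × List String)) (s t : List String) :
    samples.foldl
      (fun (st : PySem.Dict String Int × PySem.Dict String Int) pair =>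
        let wd := pair.1.foldl
          (fun d word => if d.contains word then d else d.insert word (d.size : Int)) st.1
        let td := pair.2.foldl
          (fun d tag => if d.contains tag then d else d.insert tag (d.size : Int)) st.2
        (wd, td))
      (toDict s, toDict t)
      = (toDict (PySem.Set.update s (samples.flatMap (fun p => p.1))),
         toDict (PySem.Set.update t (samples.flatMap (fun p => p.2)))) := by
  induction samples generalizing s t with
  | nil => simp [PySem.Set.update]
  | cons x xs ih =>
    simp only [List.foldl_cons, List.flatMap_cons, PySem.Set.update_append]
    rw [foldl_toDict, foldl_toDict]
    exact ih _ _

lemma toDict_nil_empty : toDict [] = PySem.Dict.empty := rfl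

-- the reversed-enumerate overwrite dict maps each element to its FIRST index (offset s)
lemma firsts_get? (flat : List String) (s : Int) (x : String) :
    (((PySem.List.enumerate flat s).reverse).foldl
        (fun (d : PySem.Dict String Int) p => d.insert p.2 p.1) PySem.Dict.empty).get? x
      = (PySem.List.index? flat x).map (fun k => s + (k : Int)) := by
  induction flat generalizing s with
  | nil => simp [PySem.List.enumerate_nil, PySem.List.index?_eq_idxOf?]
  | cons y ys ih =>
    rw [PySem.List.enumerate_cons]
    simp only [List.reverse_cons, List.foldl_append, List.foldl_cons, List.foldl_nil]
    by_cases hxy : x = y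
    · subst hxy
      rw [PySem.Dict.get?_insert_self, PySem.List.index?_cons_self]
      simp
    · rw [PySem.Dict.get?_insert_of_ne _ _ hxy, ih,
        PySem.List.index?_cons_of_ne ys (fun h => hxy h.symm)]
      cases PySem.List.index? ys x with
      | none => simp
      | some k => simp; ring

lemma firsts_keys (flat : List String) :
    (pvFirsts flat).keys = PySem.Set.ofList flat.reverse := by
  unfold pvFirsts
  rw [PySem.Dict.keys_foldl_insert_key]
  simp [PySem.Set.update_nil_left, List.map_reverse, PySem.List.map_snd_enumerate]

-- the distinct items in first-appearance order are pairwise increasing under the key 'first occurrence in xs'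
lemma ofList_pairwise_index (xs : List String) :
    (PySem.Set.ofList xs).Pairwise
      (fun a b => (PySem.List.index? xs a).getD 0 < (PySem.List.index? xs b).getD 0) := by
  induction xs using List.reverseRecOn with
  | nil => simp [PySem.Set.ofList]
  | append_singleton xs x ih =>
    rw [PySem.Set.ofList_append_singleton]
    have hmemkey : ∀ a ∈ PySem.Set.ofList xs,
        (PySem.List.index? (xs ++ [x]) a).getD 0 = (PySem.List.index? xs a).getD 0 := by
      intro a ha
      rw [PySem.List.index?_append_of_mem _ ((PySem.Set.mem_ofList xs a).mp ha)]
    by_cases hx : x ∈ xs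
    · rw [PySem.Set.add_of_mem ((PySem.Set.mem_ofList xs x).mpr hx)]
      exact List.Pairwise.imp_of_mem
        (fun {a b} ha hb h => by rw [hmemkey a ha, hmemkey b hb]; exact h) ih
    · rw [PySem.Set.add_of_not_mem (fun hc => hx ((PySem.Set.mem_ofList xs x).mp hc))]
      rw [List.pairwise_append]
      refine ⟨List.Pairwise.imp_of_mem
        (fun {a b} ha hb h => by rw [hmemkey a ha, hmemkey b hb]; exact h) ih, by simp, ?_⟩
      intro a ha b hb
      rw [List.mem_singleton] at hb; subst hb
      rw [hmemkey a ha, PySem.List.index?_append_singleton_self xs b hx]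
      have hamem : a ∈ xs := (PySem.Set.mem_ofList xs a).mp ha
      obtain ⟨k, hk⟩ := Option.isSome_iff_exists.mp
        ((PySem.List.index?_isSome_iff xs a).mpr hamem)
      obtain ⟨hklt, -, -⟩ := PySem.List.getElem_of_index?_eq_some hk
      rw [hk]; simpa using hklt

-- on members of flat, B's key firsts.get is the first-occurrence position, as an Int
lemma firsts_key_of_mem (flat : List String) (a : String) (ha : a ∈ flat) :
    ∃ k : Nat, PySem.List.index? flat a = some k ∧
      ((pvFirsts flat).get? a).getD 0 = (k : Int) := by
  obtain ⟨k, hk⟩ := Option.isSome_iff_exists.mp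
    ((PySem.List.index?_isSome_iff flat a).mpr ha)
  refine ⟨k, hk, ?_⟩
  unfold pvFirsts
  rw [firsts_get? flat 0 a, hk]
  simp

-- the distinct items (dedup order) are pairwise increasing under B's key too
lemma dedup_pairwise_firsts (flat : List String) :
    (PySem.List.dedup flat).Pairwise
      (fun a b => ((pvFirsts flat).get? a).getD 0 < ((pvFirsts flat).get? b).getD 0) := by
  rw [PySem.List.dedup_eq_ofList]
  refine List.Pairwise.imp_of_mem ?_ (ofList_pairwise_index flat)
  intro a b ha hb h
  obtain ⟨ka, hka, hva⟩ := firsts_key_of_mem flat a ((PySem.Set.mem_ofList flat a).mp ha)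
  obtain ⟨kb, hkb, hvb⟩ := firsts_key_of_mem flat b ((PySem.Set.mem_ofList flat b).mp hb)
  rw [hka, hkb] at h
  rw [hva, hvb]
  exact_mod_cast h

-- sorting the set of items by first occurrence reproduces the first-appearance (dedup) order
lemma sorted_keys_eq_dedup (flat : List String) :
    PySem.List.sorted (pvFirsts flat).keys
      (fun x => ((pvFirsts flat).get? x).getD 0) false = PySem.List.dedup flat := by
  have hperm : (PySem.List.dedup flat).Perm (pvFirsts flat).keys := by
    rw [firsts_keys, PySem.List.dedup_eq_ofList]
    refine (List.perm_ext_iff_of_nodup (PySem.Set.nodup_ofList flat)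
      (PySem.Set.nodup_ofList flat.reverse)).mpr ?_
    intro a
    rw [PySem.Set.mem_ofList, PySem.Set.mem_ofList, List.mem_reverse]
  exact PySem.List.sorted_eq_of_perm_of_pairwise_lt _ _ _ hperm (dedup_pairwise_firsts flat)

lemma pvMakeIdx_eq_toDict (seqs : List (List String)) :
    pvMakeIdx seqs = (toDict (PySem.List.dedup (seqs.flatMap (fun seq => seq)))).items := by
  simp only [pvMakeIdx, sorted_keys_eq_dedup]
  rfl

-- ===== VERDICT (by name: the statement is the Claim_ definition above) =====
theorem build_idx_spec : Claim_equal_build_idx := by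
  intro samples _
  unfold Spec_build_idx build_idx build_idx_alt
  rw [← toDict_nil_empty, outer_foldl, pvMakeIdx_eq_toDict, pvMakeIdx_eq_toDict]
  simp [PySem.Set.update_nil_left, PySem.List.dedup_eq_ofList, List.flatMap_def, Function.comp_def]
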